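-- pv_equiv track=rewrite | github.com/analogdevicesinc/pyadi-dt | scripts/adi_binding_lib.py | is_supported_compatible
-- ===== SOURCE A (Python) =====
-- def _normalize(value: str) -> str:
--     return value.strip().lower()
--
-- def is_supported_compatible(
--     candidate: str,
--     known_compatibles: set[str],
--     known_prefixes: set[str],
-- ) -> bool:
--     candidate = _normalize(candidate)
--     if candidate in known_compatibles:
--         return True
--     for known in known_compatibles:
--         if candidate.startswith(f"{known}-") or candidate.startswith(f"{known}."):
--             return True
--     for prefix in known_prefixes:
--         if candidate == prefix or candidate.startswith(f"{prefix}-") or candidate.startswith(f"{prefix}."):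
--             return True
--     if "-" in candidate and candidate.rsplit("-", 1)[0] in known_compatibles:
--         return True
--     if "." in candidate and candidate.rsplit(".", 1)[0] in known_compatibles:
--         return True
--     return False
-- ===== SOURCE B (Python) =====
-- def is_supported_compatible(candidate, known_compatibles, known_prefixes):
--     c = candidate.strip().lower()
--     if c in known_compatibles or c in known_prefixes:
--         return True
--     return any(
--         c[:i] in known_compatibles or c[:i] in known_prefixes
--         for i, ch in enumerate(c)
--         if ch in "-."
--     )
-- ===== Notes on version B (the rewrite author's own statement) =====
-- stated objective: faster
-- what changed: Instead of scanning both sets and testing startswith against every known string, B enumerates the candidate's separator positions and does one set lookup per '-'/'.' boundary prefix, O(len(candidate)) lookups independent of set sizes.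
import Mathlib
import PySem

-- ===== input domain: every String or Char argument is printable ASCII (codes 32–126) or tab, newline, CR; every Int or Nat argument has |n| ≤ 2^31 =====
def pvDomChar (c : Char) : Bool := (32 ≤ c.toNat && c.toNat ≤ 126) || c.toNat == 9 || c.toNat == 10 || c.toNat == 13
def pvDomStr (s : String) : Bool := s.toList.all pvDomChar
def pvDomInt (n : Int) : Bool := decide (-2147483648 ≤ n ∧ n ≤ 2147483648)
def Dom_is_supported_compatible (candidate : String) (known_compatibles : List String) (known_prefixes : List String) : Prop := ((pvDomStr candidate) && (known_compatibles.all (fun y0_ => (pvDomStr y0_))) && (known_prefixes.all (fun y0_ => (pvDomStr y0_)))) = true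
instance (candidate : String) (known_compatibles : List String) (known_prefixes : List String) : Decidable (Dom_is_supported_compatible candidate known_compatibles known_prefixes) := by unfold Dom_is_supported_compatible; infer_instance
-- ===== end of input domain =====

-- B replaces A's scans over both sets (startswith tested against every known string) by
-- one membership lookup per separator-boundary prefix of the candidate: faster (asymptotic in the set sizes).


-- ===== PORT A =====
-- hand port of s.rsplit(sep, 1)[0] for a one-character sep; exact whenever sep occurs in cs
-- (A only evaluates it under the guard 'sep in candidate')
def pvRsplit1Head (cs : List Char) (sep : Char) : List Char :=
  ((cs.reverse).drop ((cs.reverse).idxOf sep + 1)).reverse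

def is_supported_compatible (candidate : String) (known_compatibles : List String) (known_prefixes : List String) : Bool :=
  -- candidate = _normalize(candidate) = candidate.strip().lower()
  let cs : List Char := PySem.Chars.lower (PySem.Chars.strip candidate.toList)
  if known_compatibles.any (fun k => k.toList == cs) then true
  else if known_compatibles.any (fun known =>
        PySem.Chars.startswith cs (known.toList ++ ['-']) || PySem.Chars.startswith cs (known.toList ++ ['.'])) then true
  else if known_prefixes.any (fun prefix_ =>
        cs == prefix_.toList || PySem.Chars.startswith cs (prefix_.toList ++ ['-']) || PySem.Chars.startswith cs (prefix_.toList ++ ['.'])) then true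
  else if PySem.Chars.isIn ['-'] cs && known_compatibles.any (fun k => k.toList == pvRsplit1Head cs '-') then true
  else if PySem.Chars.isIn ['.'] cs && known_compatibles.any (fun k => k.toList == pvRsplit1Head cs '.') then true
  else false

-- ===== PORT B =====
def is_supported_compatible_alt (candidate : String) (known_compatibles : List String) (known_prefixes : List String) : Bool :=
  let cs : List Char := PySem.Chars.lower (PySem.Chars.strip candidate.toList)
  if known_compatibles.any (fun k => k.toList == cs) || known_prefixes.any (fun p => p.toList == cs) then true
  else (PySem.List.enumerate cs).any (fun p =>
        (p.2 == '-' || p.2 == '.') &&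
        (known_compatibles.any (fun k => k.toList == cs.take p.1.toNat) ||
         known_prefixes.any (fun q => q.toList == cs.take p.1.toNat)))

-- ===== PRECONDITION & SPEC =====
def Spec_is_supported_compatible (candidate : String) (known_compatibles : List String) (known_prefixes : List String) (out : Bool) : Prop := out = is_supported_compatible_alt candidate known_compatibles known_prefixes
instance (candidate : String) (known_compatibles : List String) (known_prefixes : List String) (out : Bool) : Decidable (Spec_is_supported_compatible candidate known_compatibles known_prefixes out) := by unfold Spec_is_supported_compatible; infer_instance

-- ===== CLAIM (what is proved, stated in full; the proofs are below) =====
def Claim_equal_is_supported_compatible : Prop := ∀ (candidate : String) (known_compatibles : List String) (known_prefixes : List String), Dom_is_supported_compatible candidate known_compatibles known_prefixes → Spec_is_supported_compatible candidate known_compatibles known_prefixes (is_supported_compatible candidate known_compatibles known_prefixes)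

-- ===== LEMMAS AND PROOFS =====

-- a boundary prefix: startswith cs (ks ++ [sep]) iff some position i holds sep with cs.take i = ks
theorem pv_startswith_sep_iff (cs ks : List Char) (sep : Char) :
    PySem.Chars.startswith cs (ks ++ [sep]) = true ↔
      ∃ i, ∃ h : i < cs.length, cs[i]'h = sep ∧ cs.take i = ks := by
  rw [PySem.Chars.startswith_iff]
  constructor
  · rintro ⟨t, ht⟩
    subst ht
    refine ⟨ks.length, by simp, by simp, by simp⟩
  · rintro ⟨i, h, hsep, htake⟩
    refine ⟨cs.drop (i + 1), ?_⟩
    calc ks ++ [sep] ++ cs.drop (i + 1)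
        = cs.take i ++ (cs[i]'h :: cs.drop (i + 1)) := by rw [htake, hsep]; simp
      _ = cs.take i ++ cs.drop i := by rw [List.getElem_cons_drop]
      _ = cs := List.take_append_drop i cs

-- pvRsplit1Head points at the LAST occurrence of sep
theorem pv_rsplit1Head_spec (cs : List Char) (sep : Char) (h : sep ∈ cs) :
    ∃ i, ∃ hi : i < cs.length, cs[i]'hi = sep ∧ cs.take i = pvRsplit1Head cs sep := by
  have hj : cs.reverse.idxOf sep < cs.reverse.length :=
    List.idxOf_lt_length_of_mem (List.mem_reverse.mpr h)
  have hj' : cs.reverse.idxOf sep < cs.length := by simpa using hj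
  refine ⟨cs.length - 1 - cs.reverse.idxOf sep, by omega, ?_, ?_⟩
  · have := List.getElem_idxOf hj
    rw [List.getElem_reverse] at this
    simpa using this
  · unfold pvRsplit1Head
    rw [List.drop_reverse, List.reverse_reverse]
    congr 1
    omega

theorem pv_core (cs : List Char) (kc kp : List String) :
    (if kc.any (fun k => k.toList == cs) then true
     else if kc.any (fun known =>
          PySem.Chars.startswith cs (known.toList ++ ['-']) || PySem.Chars.startswith cs (known.toList ++ ['.'])) then true
     else if kp.any (fun prefix_ =>
          cs == prefix_.toList || PySem.Chars.startswith cs (prefix_.toList ++ ['-']) || PySem.Chars.startswith cs (prefix_.toList ++ ['.'])) then true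
     else if PySem.Chars.isIn ['-'] cs && kc.any (fun k => k.toList == pvRsplit1Head cs '-') then true
     else if PySem.Chars.isIn ['.'] cs && kc.any (fun k => k.toList == pvRsplit1Head cs '.') then true
     else false) =
    (if kc.any (fun k => k.toList == cs) || kp.any (fun p => p.toList == cs) then true
     else (PySem.List.enumerate cs).any (fun p =>
          (p.2 == '-' || p.2 == '.') &&
          (kc.any (fun k => k.toList == cs.take p.1.toNat) ||
           kp.any (fun q => q.toList == cs.take p.1.toNat)))) := by
  rw [Bool.eq_iff_iff]
  simp only [Bool.if_true_left, Bool.or_eq_true, Bool.and_eq_true, List.any_eq_true,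
    beq_iff_eq, decide_eq_true_eq, Bool.if_false_right, pv_startswith_sep_iff,
    PySem.Chars.isIn_iff_infix, List.singleton_infix_iff, PySem.List.mem_enumerate_iff]
  constructor
  · rintro (h1 | ⟨x, hx, hsw⟩ | ⟨x, hx, hsw⟩ | ⟨hmem, x, hx, hxe⟩ | ⟨⟨hmem, x, hx, hxe⟩, -⟩)
    · exact Or.inl (Or.inl h1)
    · rcases hsw with ⟨i, hi, hsep, ht⟩ | ⟨i, hi, hsep, ht⟩ <;>
        exact Or.inr ⟨(0 + (i : Int), cs[i]), ⟨i, hi, rfl⟩, by simp [hsep], Or.inl ⟨x, hx, by simpa using ht.symm⟩⟩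
    · rcases hsw with (heq | ⟨i, hi, hsep, ht⟩) | ⟨i, hi, hsep, ht⟩
      · exact Or.inl (Or.inr ⟨x, hx, heq.symm⟩)
      · exact Or.inr ⟨(0 + (i : Int), cs[i]), ⟨i, hi, rfl⟩, by simp [hsep], Or.inr ⟨x, hx, by simpa using ht.symm⟩⟩
      · exact Or.inr ⟨(0 + (i : Int), cs[i]), ⟨i, hi, rfl⟩, by simp [hsep], Or.inr ⟨x, hx, by simpa using ht.symm⟩⟩
    · obtain ⟨i, hi, hsep, ht⟩ := pv_rsplit1Head_spec cs '-' hmem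
      exact Or.inr ⟨(0 + (i : Int), cs[i]), ⟨i, hi, rfl⟩, by simp [hsep], Or.inl ⟨x, hx, by simpa using (ht.trans hxe.symm).symm⟩⟩
    · obtain ⟨i, hi, hsep, ht⟩ := pv_rsplit1Head_spec cs '.' hmem
      exact Or.inr ⟨(0 + (i : Int), cs[i]), ⟨i, hi, rfl⟩, by simp [hsep], Or.inl ⟨x, hx, by simpa using (ht.trans hxe.symm).symm⟩⟩
  · rintro ((h | ⟨x, hx, hxe⟩) | ⟨x, ⟨k, hk, rfl⟩, hsep, hmem⟩)
    · exact Or.inl h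
    · exact Or.inr (Or.inr (Or.inl ⟨x, hx, Or.inl (Or.inl hxe.symm)⟩))
    · dsimp only at hsep hmem
      rw [show ((0 : Int) + (k : Int)).toNat = k by simp] at hmem
      rcases hmem with ⟨y, hy, hyt⟩ | ⟨y, hy, hyt⟩ <;> rcases hsep with hsep | hsep
      · exact Or.inr (Or.inl ⟨y, hy, Or.inl ⟨k, hk, hsep, hyt.symm⟩⟩)
      · exact Or.inr (Or.inl ⟨y, hy, Or.inr ⟨k, hk, hsep, hyt.symm⟩⟩)
      · exact Or.inr (Or.inr (Or.inl ⟨y, hy, Or.inl (Or.inr ⟨k, hk, hsep, hyt.symm⟩)⟩))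
      · exact Or.inr (Or.inr (Or.inl ⟨y, hy, Or.inr ⟨k, hk, hsep, hyt.symm⟩⟩))

-- ===== VERDICT (by name: the statement is the Claim_ definition above) =====
theorem is_supported_compatible_spec : Claim_equal_is_supported_compatible := by
  intro candidate kc kp _
  unfold Spec_is_supported_compatible is_supported_compatible is_supported_compatible_alt
  exact pv_core _ _ _
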